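-- pv_equiv track=rewrite | github.com/cefavn/log-analyser-for-detection | parse.py | resolve_field_value
-- ===== SOURCE A (Python) =====
-- FIELD_ALIASES = {
--     'ProcessPath': ['Image', 'New Process Name'],
--     'ProcessCmdLine': ['CommandLine', 'Process Command Line'],
--     'ParentProcessPath': ['ParentImage', 'Creator Process Name'],
--     'ParentProcessCmdLine': ['ParentCommandLine', 'Creator Process Command Line'],
--     'UserAccount': ['User', 'Account Name'],
-- }
--
-- def resolve_field_value(field_name, kv_dict):
--     """
--     Resolve field value from parsed event data, checking aliases if needed.
--     Returns (value, field_used) tuple, or (None, None) if not found.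
--     """
--     # Check if field exists directly
--     if field_name in kv_dict:
--         return kv_dict[field_name], field_name
--
--     # Check case-insensitive match
--     lower_field = field_name.lower()
--     for k, v in kv_dict.items():
--         if k.lower() == lower_field:
--             return v, k
--
--     # Check if it's an alias and try the actual field names
--     if field_name in FIELD_ALIASES:
--         for actual_field in FIELD_ALIASES[field_name]:
--             if actual_field in kv_dict:
--                 return kv_dict[actual_field], actual_field
--             # Also check case-insensitive
--             for k in kv_dict:
--                 if k.lower() == actual_field.lower():
--                     return kv_dict[k], k
--
--     return None, None
-- ===== SOURCE B (Python) =====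
-- FIELD_ALIASES = {
--     'ProcessPath': ['Image', 'New Process Name'],
--     'ProcessCmdLine': ['CommandLine', 'Process Command Line'],
--     'ParentProcessPath': ['ParentImage', 'Creator Process Name'],
--     'ParentProcessCmdLine': ['ParentCommandLine', 'Creator Process Command Line'],
--     'UserAccount': ['User', 'Account Name'],
-- }
--
--
-- def resolve_field_value(field_name, kv_dict):
--     """Single pass over kv_dict: score each key by the priority of the first
--     check it satisfies (exact/ci for the field name, then exact/ci for each
--     alias), and keep the lowest-scoring entry (earliest wins ties)."""
--     names = [field_name] + FIELD_ALIASES.get(field_name, [])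
--     pairs = [(nm, nm.lower()) for nm in names]
--
--     def rank(k):
--         kl = k.lower()
--         j = 0
--         for nm, nml in pairs:
--             if k == nm:
--                 return j
--             if kl == nml:
--                 return j + 1
--             j += 2
--         return None
--
--     best = None  # (rank, value, key)
--     for k, v in kv_dict.items():
--         r = rank(k)
--         if r is not None and (best is None or r < best[0]):
--             best = (r, v, k)
--     if best is None:
--         return None, None
--     return best[1], best[2]
-- ===== Notes on version B (the rewrite author's own statement) =====
-- stated objective: alternative
-- what changed: Replaces A's staged lookups (direct, then case-insensitive scan, then per-alias direct/case-insensitive scans) with a single pass over kv_dict that ranks every key by the first priority check it satisfies and keeps the lowest-ranked entry (first on ties).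
import Mathlib
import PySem

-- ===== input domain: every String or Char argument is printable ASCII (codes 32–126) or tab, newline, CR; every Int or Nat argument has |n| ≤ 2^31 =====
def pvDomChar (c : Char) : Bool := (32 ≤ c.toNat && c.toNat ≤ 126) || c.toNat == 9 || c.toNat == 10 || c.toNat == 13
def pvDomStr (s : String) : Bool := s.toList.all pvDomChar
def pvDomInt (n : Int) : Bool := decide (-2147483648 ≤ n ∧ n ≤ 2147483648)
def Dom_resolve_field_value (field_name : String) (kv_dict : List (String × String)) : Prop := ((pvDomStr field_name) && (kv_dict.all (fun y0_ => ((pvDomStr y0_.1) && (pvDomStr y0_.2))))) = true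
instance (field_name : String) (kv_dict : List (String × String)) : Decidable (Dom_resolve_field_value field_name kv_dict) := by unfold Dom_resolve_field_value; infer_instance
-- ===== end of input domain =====

-- B replaces A's staged lookups (direct, case-insensitive, per-alias direct/ci) with a
-- single pass over kv_dict that scores every key by the priority of the first check it
-- satisfies and keeps the lowest-scoring entry; objective: alternative algorithm, same value.

-- Python dict __getitem__ / 'in' on the association list: first match (shared module primitive)
def pvDictGet (kv : List (String × String)) (k : String) : Option String :=
  (kv.find? (fun p => p.1 == k)).map (·.2)

-- module-level constant FIELD_ALIASES (shared by A and B)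
def pvFieldAliases : List (String × List String) :=
  [("ProcessPath", ["Image", "New Process Name"]),
   ("ProcessCmdLine", ["CommandLine", "Process Command Line"]),
   ("ParentProcessPath", ["ParentImage", "Creator Process Name"]),
   ("ParentProcessCmdLine", ["ParentCommandLine", "Creator Process Command Line"]),
   ("UserAccount", ["User", "Account Name"])]

-- ===== PORT A =====
-- A's step-2 loop: `for k, v in kv_dict.items(): if k.lower() == lower_field: return v, k`
def pvCiScanA : List (String × String) → String → Option (String × String)
  | [], _ => none
  | (k, v) :: rest, t =>
    if PySem.Str.lower k == t then some (k, v) else pvCiScanA rest t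

-- A's step-3 inner loop: `for k in kv_dict: if k.lower() == actual_field.lower(): return kv_dict[k], k`
-- (value re-fetched via kv_dict[k])
def pvCiKeyScanA (full : List (String × String)) :
    List (String × String) → String → Option (Option String × String)
  | [], _ => none
  | (k, _) :: rest, t =>
    if PySem.Str.lower k == t then some (pvDictGet full k, k)
    else pvCiKeyScanA full rest t

-- A's `for actual_field in FIELD_ALIASES[field_name]` loop
def pvAliasLoopA (kv : List (String × String)) : List String → Option String × Option String
  | [] => (none, none)
  | a :: rest =>
    match pvDictGet kv a with
    | some v => (some v, some a)
    | none =>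
      match pvCiKeyScanA kv kv (PySem.Str.lower a) with
      | some (ov, k) => (ov, some k)
      | none => pvAliasLoopA kv rest

def resolve_field_value (field_name : String) (kv_dict : List (String × String)) :
    Option String × Option String :=
  match pvDictGet kv_dict field_name with
  | some v => (some v, some field_name)
  | none =>
    match pvCiScanA kv_dict (PySem.Str.lower field_name) with
    | some (k, v) => (some v, some k)
    | none =>
      match (pvFieldAliases.find? (fun p => p.1 == field_name)).map (·.2) with
      | some actuals => pvAliasLoopA kv_dict actuals
      | none => (none, none)

-- ===== PORT B =====
-- B's pairs list: each candidate name with its precomputed lowercase form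
def pvPairsB (names : List String) : List (String × String) :=
  names.map (fun nm => (nm, PySem.Str.lower nm))

-- B's `rank(k)`: walk the pairs, exact check then ci check, counting priorities by 2
def pvRankB : List (String × String) → Nat → String → String → Option Nat
  | [], _, _, _ => none
  | (nm, nml) :: rest, j, k, kl =>
    if k == nm then some j
    else if kl == nml then some (j + 1)
    else pvRankB rest (j + 2) k kl

-- B's main loop: keep the entry with the smallest rank (strict <, so first wins ties)
def pvScanB (pairs : List (String × String)) :
    List (String × String) → Option (Nat × String × String) → Option (Nat × String × String)
  | [], best => best
  | (k, v) :: rest, best =>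
    match pvRankB pairs 0 k (PySem.Str.lower k) with
    | none => pvScanB pairs rest best
    | some r =>
      match best with
      | none => pvScanB pairs rest (some (r, v, k))
      | some b => if r < b.1 then pvScanB pairs rest (some (r, v, k)) else pvScanB pairs rest best

def resolve_field_value_alt (field_name : String) (kv_dict : List (String × String)) :
    Option String × Option String :=
  match pvScanB (pvPairsB (field_name ::
      ((pvFieldAliases.find? (fun p => p.1 == field_name)).map (·.2)).getD [])) kv_dict none with
  | none => (none, none)
  | some (_, v, k) => (some v, some k)

-- ===== PRECONDITION & SPEC =====
def Spec_resolve_field_value (field_name : String) (kv_dict : List (String × String)) (out : Option String × Option String) : Prop := out = resolve_field_value_alt field_name kv_dict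
instance (field_name : String) (kv_dict : List (String × String)) (out : Option String × Option String) : Decidable (Spec_resolve_field_value field_name kv_dict out) := by unfold Spec_resolve_field_value; infer_instance

-- ===== CLAIM (what is proved, stated in full; the proofs are below) =====
def Claim_equal_resolve_field_value : Prop := ∀ (field_name : String) (kv_dict : List (String × String)), Dom_resolve_field_value field_name kv_dict → Spec_resolve_field_value field_name kv_dict (resolve_field_value field_name kv_dict)

-- ===== LEMMAS AND PROOFS =====

-- proof-side predicate-list view of B's checks
def pvPredsB (names : List String) : List (String → Bool) :=
  names.flatMap (fun nm =>
    [fun k => k == nm, fun k => PySem.Str.lower k == PySem.Str.lower nm])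

-- proof-side rank over a predicate list
def pvRankC : List (String → Bool) → Nat → String → Option Nat
  | [], _, _ => none
  | p :: rest, j, k => if p k then some j else pvRankC rest (j + 1) k

-- proof-side scan over a predicate list
def pvScanC (preds : List (String → Bool)) :
    List (String × String) → Option (Nat × String × String) → Option (Nat × String × String)
  | [], best => best
  | (k, v) :: rest, best =>
    match pvRankC preds 0 k with
    | none => pvScanC preds rest best
    | some r =>
      match best with
      | none => pvScanC preds rest (some (r, v, k))
      | some b => if r < b.1 then pvScanC preds rest (some (r, v, k)) else pvScanC preds rest best

-- B's pair-walking rank is the predicate-list rank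
theorem rankB_eq_rankC (names : List String) (j : Nat) (k : String) :
    pvRankB (pvPairsB names) j k (PySem.Str.lower k) = pvRankC (pvPredsB names) j k := by
  induction names generalizing j with
  | nil => rfl
  | cons nm rest ih =>
    simp only [pvPairsB, List.map_cons, pvRankB, pvPredsB, List.flatMap_cons,
      List.cons_append, List.nil_append, pvRankC]
    by_cases h1 : k == nm
    · simp [h1]
    · by_cases h2 : PySem.Str.lower k == PySem.Str.lower nm
      · simp [h1, h2]
      · simpa [h1, h2, pvPairsB, pvPredsB] using ih (j + 2)

-- B's scan is the predicate-list scan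
theorem scanB_eq_scanC (names : List String) (kv : List (String × String))
    (best : Option (Nat × String × String)) :
    pvScanB (pvPairsB names) kv best = pvScanC (pvPredsB names) kv best := by
  induction kv generalizing best with
  | nil => rfl
  | cons e rest ih =>
    obtain ⟨k, v⟩ := e
    simp only [pvScanB, pvScanC, rankB_eq_rankC names 0 k]
    cases pvRankC (pvPredsB names) 0 k with
    | none => exact ih best
    | some r =>
      cases best with
      | none => exact ih _
      | some b => by_cases h : r < b.1 <;> simp [h, ih]

-- staged first-match search over a priority list of predicates (characterises A)
def pvStaged : List (String → Bool) → List (String × String) → Option (String × String)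
  | [], _ => none
  | c :: cs, kv =>
    match kv.find? (fun e => c e.1) with
    | some e => some e
    | none => pvStaged cs kv

-- result shape shared by both sides
def pvOut : Option (String × String) → Option String × Option String
  | none => (none, none)
  | some (k, v) => (some v, some k)

theorem rank_shift (l : List (String → Bool)) (j : Nat) (k : String) :
    pvRankC l j k = (pvRankC l 0 k).map (· + j) := by
  induction l generalizing j with
  | nil => simp [pvRankC]
  | cons p rest ih =>
    by_cases h : p k
    · simp [pvRankC, h]
    · simp [pvRankC, h, ih (j + 1), ih 1, Option.map_map]
      congr 1
      funext x
      omega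

theorem rank_cons (c : String → Bool) (cs : List (String → Bool)) (k : String) :
    pvRankC (c :: cs) 0 k = if c k then some 0 else (pvRankC cs 0 k).map (· + 1) := by
  by_cases h : c k <;> simp [pvRankC, h, rank_shift cs 1 k]

-- empty predicate list: the scan just returns the accumulator
theorem scan_nil_preds (kv : List (String × String)) (best : Option (Nat × String × String)) :
    pvScanC [] kv best = best := by
  induction kv generalizing best with
  | nil => rfl
  | cons e rest ih => obtain ⟨k, v⟩ := e; simp [pvScanC, pvRankC, ih]

-- a rank-0 best is never displaced
theorem scan_absorb (preds : List (String → Bool)) (kv : List (String × String))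
    (v k : String) : pvScanC preds kv (some (0, v, k)) = some (0, v, k) := by
  induction kv with
  | nil => rfl
  | cons e rest ih =>
    obtain ⟨k0, v0⟩ := e
    simp only [pvScanC]
    cases pvRankC preds 0 k0 with
    | none => exact ih
    | some r => simp [ih]

-- if c holds somewhere, the scan over (c :: cs) returns the first entry where c holds,
-- provided the accumulator has no rank-0 entry yet
theorem scan_hit (c : String → Bool) (cs : List (String → Bool))
    (kv : List (String × String)) (k0 v0 : String)
    (hf : kv.find? (fun e => c e.1) = some (k0, v0))
    (best : Option (Nat × String × String))
    (hb : best = none ∨ ∃ r v k, best = some (r, v, k) ∧ 1 ≤ r) :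
    pvScanC (c :: cs) kv best = some (0, v0, k0) := by
  induction kv generalizing best with
  | nil => simp at hf
  | cons e rest ih =>
    obtain ⟨k, v⟩ := e
    by_cases hc : c k
    · have : k0 = k ∧ v0 = v := by
        simp [List.find?, hc] at hf
        exact ⟨hf.1.symm, hf.2.symm⟩
      obtain ⟨hk, hv⟩ := this; subst hk; subst hv
      simp only [pvScanC, rank_cons, hc, if_pos]
      rcases hb with hb | ⟨r, v', k', hb, hr⟩
      · subst hb; exact scan_absorb _ _ _ _
      · subst hb
        have : 0 < r := hr
        simp [this, scan_absorb]
    · have hf' : rest.find? (fun e => c e.1) = some (k0, v0) := by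
        simpa [List.find?, hc] using hf
      simp only [pvScanC, rank_cons, hc, if_neg, Bool.false_eq_true, not_false_iff]
      cases hr : (pvRankC cs 0 k).map (· + 1) with
      | none => exact ih hf' best hb
      | some r =>
        have hr1 : 1 ≤ r := by
          cases h0 : pvRankC cs 0 k with
          | none => simp [h0] at hr
          | some j => simp [h0] at hr; omega
        rcases hb with hb | ⟨r', v', k', hb, hr'⟩
        · subst hb
          exact ih hf' (some (r, v, k)) (Or.inr ⟨r, v, k, rfl, hr1⟩)
        · subst hb
          by_cases hlt : r < r'
          · simp only [hlt, if_pos]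
            exact ih hf' (some (r, v, k)) (Or.inr ⟨r, v, k, rfl, hr1⟩)
          · simp only [hlt, if_neg, not_false_iff]
            exact ih hf' (some (r', v', k')) (Or.inr ⟨r', v', k', rfl, hr'⟩)

-- if c holds nowhere in kv, the scan over (c :: cs) is the scan over cs with all ranks shifted
theorem scan_shift (c : String → Bool) (cs : List (String → Bool))
    (kv : List (String × String)) (hall : ∀ e ∈ kv, c e.1 = false)
    (b : Option (Nat × String × String)) :
    pvScanC (c :: cs) kv (b.map (fun t => (t.1 + 1, t.2))) =
      (pvScanC cs kv b).map (fun t => (t.1 + 1, t.2)) := by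
  induction kv generalizing b with
  | nil => rfl
  | cons e rest ih =>
    obtain ⟨k, v⟩ := e
    have hck : c k = false := hall (k, v) (List.mem_cons_self ..)
    have hall' : ∀ e ∈ rest, c e.1 = false := fun e he => hall e (List.mem_cons_of_mem _ he)
    simp only [pvScanC, rank_cons, hck, Bool.false_eq_true, if_neg, not_false_iff]
    cases h0 : pvRankC cs 0 k with
    | none => simpa using ih hall' b
    | some r =>
      cases b with
      | none => simpa using ih hall' (some (r, v, k))
      | some t =>
        obtain ⟨rb, vb, kb⟩ := t
        simp only [Option.map_some]
        by_cases hlt : r < rb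
        · have : r + 1 < rb + 1 := by omega
          simp only [this, if_pos, hlt]
          simpa using ih hall' (some (r, v, k))
        · have : ¬ (r + 1 < rb + 1) := by omega
          simp only [this, if_neg, hlt, not_false_iff]
          simpa using ih hall' (some (rb, vb, kb))

-- pvPredsB unfolds one candidate at a time
theorem predsB_cons (a : String) (rest : List String) :
    pvPredsB (a :: rest) = (fun k => k == a) ::
      (fun k => PySem.Str.lower k == PySem.Str.lower a) :: pvPredsB rest := rfl

-- core: the single-pass min-rank scan computes the staged first-match search
theorem scan_eq_staged (conds : List (String → Bool)) (kv : List (String × String)) :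
    (pvScanC conds kv none).map (fun t => (t.2.2, t.2.1)) = pvStaged conds kv := by
  induction conds with
  | nil => simp [scan_nil_preds, pvStaged]
  | cons c cs ih =>
    cases hf : kv.find? (fun e => c e.1) with
    | some e =>
      obtain ⟨k0, v0⟩ := e
      rw [scan_hit c cs kv k0 v0 hf none (Or.inl rfl)]
      simp [pvStaged, hf]
    | none =>
      have hall : ∀ e ∈ kv, c e.1 = false := by
        intro e he
        have := List.find?_eq_none.mp hf e he
        simpa using this
      have := scan_shift c cs kv hall none
      simp only [Option.map_none] at this
      rw [this, pvStaged, hf, ← ih, Option.map_map]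
      rfl

-- the scan only returns keys whose lowered form matches the target
theorem ciScanA_matches (kv : List (String × String)) (t k v : String)
    (h : pvCiScanA kv t = some (k, v)) : (PySem.Str.lower k == t) = true := by
  induction kv with
  | nil => simp [pvCiScanA] at h
  | cons p rest ih =>
    obtain ⟨k0, v0⟩ := p
    by_cases hl : PySem.Str.lower k0 == t
    · simp [pvCiScanA, hl] at h
      simpa [h.1] using hl
    · simp [pvCiScanA, hl] at h
      exact ih h

-- the key found by the case-insensitive scan is its own first occurrence,
-- so re-fetching kv_dict[k] yields exactly the value at the hit
theorem dictGet_of_ciScanA (kv : List (String × String)) (t k v : String)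
    (h : pvCiScanA kv t = some (k, v)) : pvDictGet kv k = some v := by
  induction kv with
  | nil => simp [pvCiScanA] at h
  | cons p rest ih =>
    obtain ⟨k0, v0⟩ := p
    by_cases hl : PySem.Str.lower k0 == t
    · simp [pvCiScanA, hl] at h
      obtain ⟨hk, hv⟩ := h
      simp [pvDictGet, List.find?, hk, hv]
    · simp [pvCiScanA, hl] at h
      have hne : (k0 == k) = false := by
        by_contra hc
        have hb : (k0 == k) = true := by
          cases hb0 : (k0 == k) with
          | true => rfl
          | false => exact absurd hb0 hc
        have hkk : k0 = k := eq_of_beq hb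
        subst hkk
        exact hl (ciScanA_matches rest t k0 v h)
      have := ih h
      simpa [pvDictGet, List.find?, hne] using this

-- pvCiScanA is a find?
theorem ciScanA_eq_find (kv : List (String × String)) (t : String) :
    pvCiScanA kv t = kv.find? (fun e => PySem.Str.lower e.1 == t) := by
  induction kv with
  | nil => rfl
  | cons p rest ih =>
    obtain ⟨k, v⟩ := p
    by_cases h : PySem.Str.lower k == t <;> simp [pvCiScanA, List.find?, h, ih]

-- A's step-3 scan over a suffix, expressed through pvCiScanA
theorem ciKeyScanA_eq (full : List (String × String)) (kv : List (String × String)) (t : String) :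
    pvCiKeyScanA full kv t = (pvCiScanA kv t).map (fun p => (pvDictGet full p.1, p.1)) := by
  induction kv with
  | nil => simp [pvCiScanA, pvCiKeyScanA]
  | cons p rest ih =>
    obtain ⟨k, v⟩ := p
    by_cases h : PySem.Str.lower k == t <;> simp [pvCiScanA, pvCiKeyScanA, h, ih]

-- A's alias loop is the staged search over the aliases' predicate pairs
theorem aliasLoop_eq_staged (kv : List (String × String)) (acts : List String) :
    pvAliasLoopA kv acts = pvOut (pvStaged (pvPredsB acts) kv) := by
  induction acts with
  | nil => rfl
  | cons a rest ih =>
    rw [predsB_cons]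
    simp only [pvAliasLoopA, pvStaged]
    cases hg : pvDictGet kv a with
    | some v =>
      simp only [pvDictGet, Option.map_eq_some_iff] at hg
      obtain ⟨e, he, hv⟩ := hg
      obtain ⟨ke, ve⟩ := e
      have hke : ke = a := by
        have := List.find?_some he
        exact eq_of_beq (by simpa using this)
      subst hke
      simp at hv; subst hv
      rw [he]
      simp [pvOut]
    | none =>
      have hgf : kv.find? (fun e => e.1 == a) = none := by
        simp only [pvDictGet] at hg
        cases h : kv.find? (fun p => p.1 == a) with
        | none => rfl
        | some e => simp [h] at hg
      rw [hgf]
      rw [ciKeyScanA_eq kv kv (PySem.Str.lower a), ciScanA_eq_find]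
      cases hs : kv.find? (fun e => PySem.Str.lower e.1 == PySem.Str.lower a) with
      | none => simpa [pvStaged] using ih
      | some e =>
        obtain ⟨k, v⟩ := e
        have := dictGet_of_ciScanA kv (PySem.Str.lower a) k v (by rw [ciScanA_eq_find]; exact hs)
        simp [this, pvOut]

-- A equals the staged search over the whole predicate list
theorem A_eq_staged (field_name : String) (kv : List (String × String)) :
    resolve_field_value field_name kv =
      pvOut (pvStaged (pvPredsB (field_name ::
        ((pvFieldAliases.find? (fun p => p.1 == field_name)).map (·.2)).getD [])) kv) := by
  rw [predsB_cons]
  simp only [resolve_field_value, pvStaged]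
  cases hg : pvDictGet kv field_name with
  | some v =>
    simp only [pvDictGet, Option.map_eq_some_iff] at hg
    obtain ⟨e, he, hv⟩ := hg
    obtain ⟨ke, ve⟩ := e
    have hke : ke = field_name := by
      have := List.find?_some he
      exact eq_of_beq (by simpa using this)
    subst hke
    simp at hv; subst hv
    rw [he]
    simp [pvOut]
  | none =>
    have hgf : kv.find? (fun e => e.1 == field_name) = none := by
      simp only [pvDictGet] at hg
      cases h : kv.find? (fun p => p.1 == field_name) with
      | none => rfl
      | some e => simp [h] at hg
    rw [hgf, ciScanA_eq_find]
    cases hs : kv.find? (fun e => PySem.Str.lower e.1 == PySem.Str.lower field_name) with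
    | some e => obtain ⟨k, v⟩ := e; simp [pvOut]
    | none =>
      cases hf : (pvFieldAliases.find? (fun p => p.1 == field_name)).map (·.2) with
      | some actuals => simpa using aliasLoop_eq_staged kv actuals
      | none => simp [pvPredsB, pvStaged, pvOut]

-- ===== VERDICT (by name: the statement is the Claim_ definition above) =====
theorem resolve_field_value_spec : Claim_equal_resolve_field_value := by
  intro field_name kv_dict _
  unfold Spec_resolve_field_value
  rw [A_eq_staged]
  unfold resolve_field_value_alt
  rw [scanB_eq_scanC, ← scan_eq_staged]
  cases pvScanC (pvPredsB (field_name ::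
      ((pvFieldAliases.find? (fun p => p.1 == field_name)).map (·.2)).getD [])) kv_dict none with
  | none => rfl
  | some t => obtain ⟨r, v, k⟩ := t; rfl
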